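-- pv_equiv track=rewrite | github.com/arnut-boonlert/test | run_agent.py | analyze_sequence
-- ===== SOURCE A (Python) =====
-- def analyze_sequence(seq):
--     # Dictionary to store the frequency of each number
--     frequency = {}
--     # Dictionary to store the last index seen for each number
--     last_seen = {}
--     # Dictionary to store the time intervals for each number
--     intervals = {}
--
--     for i, num in enumerate(seq):
--         # Update the frequency
--         if num not in frequency:
--             frequency[num] = 0
--             intervals[num] = []
--         frequency[num] += 1
--
--         # Calculate the interval since last seen
--         if num in last_seen:
--             interval = i - last_seen[num]
--             intervals[num].append(interval)
--
--         # Update the last seen index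
--         last_seen[num] = i
--
--     return frequency, intervals
-- ===== SOURCE B (Python) =====
-- def analyze_sequence(seq):
--     # One pass: index table per value, then derive counts and gaps.
--     positions = {}
--     for i, num in enumerate(seq):
--         positions[num] = positions.get(num, []) + [i]
--     frequency = {num: len(idxs) for num, idxs in positions.items()}
--     intervals = {num: [b - a for a, b in zip(idxs, idxs[1:])]
--                  for num, idxs in positions.items()}
--     return frequency, intervals
-- ===== Notes on version B (the rewrite author's own statement) =====
-- stated objective: alternative
-- what changed: B replaces A's incremental frequency/last_seen/intervals bookkeeping with a single positions index table per value, from which frequency (lengths) and intervals (adjacent differences) are derived in a second pass.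
import Mathlib
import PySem

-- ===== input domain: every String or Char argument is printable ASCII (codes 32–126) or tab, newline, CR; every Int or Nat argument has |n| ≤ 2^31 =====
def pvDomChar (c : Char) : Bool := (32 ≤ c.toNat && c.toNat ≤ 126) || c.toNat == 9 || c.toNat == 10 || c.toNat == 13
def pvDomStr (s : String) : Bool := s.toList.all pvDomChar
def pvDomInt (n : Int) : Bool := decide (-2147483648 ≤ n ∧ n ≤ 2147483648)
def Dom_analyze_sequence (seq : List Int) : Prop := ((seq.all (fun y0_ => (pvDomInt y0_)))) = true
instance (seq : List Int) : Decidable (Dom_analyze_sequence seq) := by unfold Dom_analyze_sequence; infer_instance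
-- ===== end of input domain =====

-- B builds one positions index table per value and derives frequency (lengths) and
-- intervals (adjacent differences) from it, instead of A's incremental
-- frequency/last_seen/intervals bookkeeping; same cost, different decomposition.

-- ===== PORT A =====
-- loop body of A's for-loop (state = (frequency, last_seen, intervals))
def aStep (st : PySem.Dict Int Int × PySem.Dict Int Int × PySem.Dict Int (List Int))
    (p : Int × Int) : PySem.Dict Int Int × PySem.Dict Int Int × PySem.Dict Int (List Int) :=
  let i := p.1
  let num := p.2
  let frequency := st.1
  let last_seen := st.2.1
  let intervals := st.2.2
  -- if num not in frequency: frequency[num] = 0; intervals[num] = []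
  let frequency2 := if frequency.contains num then frequency else frequency.insert num 0
  let intervals2 := if frequency.contains num then intervals else intervals.insert num []
  -- frequency[num] += 1
  let frequency3 := frequency2.modify num 0 (· + 1)
  -- if num in last_seen: intervals[num].append(i - last_seen[num])
  let intervals3 :=
    if last_seen.contains num then
      intervals2.modify num [] (fun l => l ++ [i - last_seen.getD num 0])
    else intervals2
  -- last_seen[num] = i
  let last_seen2 := last_seen.insert num i
  (frequency3, last_seen2, intervals3)

def analyze_sequence (seq : List Int) : (List (Int × Int)) × (List (Int × List Int)) :=
  let st := (PySem.List.enumerate seq 0).foldl aStep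
    (PySem.Dict.empty, PySem.Dict.empty, PySem.Dict.empty)
  (st.1.items, st.2.2.items)

-- ===== PORT B =====
-- loop body of B's for-loop: positions[num] = positions.get(num, []) + [i]
def bStep (d : PySem.Dict Int (List Int)) (p : Int × Int) : PySem.Dict Int (List Int) :=
  d.insert p.2 (d.getD p.2 [] ++ [p.1])

def analyze_sequence_alt (seq : List Int) : (List (Int × Int)) × (List (Int × List Int)) :=
  let positions := (PySem.List.enumerate seq 0).foldl bStep PySem.Dict.empty
  (positions.items.map (fun kv => (kv.1, (kv.2.length : Int))),
   positions.items.map (fun kv => (kv.1, (kv.2.zip (kv.2.drop 1)).map (fun q => q.2 - q.1))))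

-- ===== PRECONDITION & SPEC =====
def Spec_analyze_sequence (seq : List Int) (out : (List (Int × Int)) × (List (Int × List Int))) : Prop := out = analyze_sequence_alt seq
instance (seq : List Int) (out : (List (Int × Int)) × (List (Int × List Int))) : Decidable (Spec_analyze_sequence seq out) := by unfold Spec_analyze_sequence; infer_instance

-- ===== CLAIM (what is proved, stated in full; the proofs are below) =====
def Claim_equal_analyze_sequence : Prop := ∀ (seq : List Int), Dom_analyze_sequence seq → Spec_analyze_sequence seq (analyze_sequence seq)

-- ===== LEMMAS AND PROOFS =====

-- views of the positions table P: the three dict item-lists A maintains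
def freqOf (P : List (Int × List Int)) : List (Int × Int) :=
  P.map (fun kv => (kv.1, (kv.2.length : Int)))
def lastOf (P : List (Int × List Int)) : List (Int × Int) :=
  P.map (fun kv => (kv.1, kv.2.getLastD 0))
def intvOf (P : List (Int × List Int)) : List (Int × List Int) :=
  P.map (fun kv => (kv.1, (kv.2.zip (kv.2.drop 1)).map (fun q => q.2 - q.1)))

theorem find?_map_view {β : Type} (g : List Int → β) (P : List (Int × List Int)) (k : Int) :
    List.find? (fun q => q.1 == k) (P.map (fun kv => (kv.1, g kv.2)))
      = (List.find? (fun q => q.1 == k) P).map (fun kv => (kv.1, g kv.2)) := by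
  induction P with
  | nil => rfl
  | cons a t ih =>
    by_cases h : a.1 = k
    · simp [List.find?, h]
    · simp only [List.map_cons, List.find?]
      rw [show ((a.1 == k) = false) from beq_eq_false_iff_ne.mpr h]
      simpa using ih

-- adjacent differences of a nonempty list extended by one element
theorem diffs_append (v : List Int) (hv : v ≠ []) (i : Int) :
    ((v ++ [i]).zip ((v ++ [i]).drop 1)).map (fun q => q.2 - q.1)
      = (v.zip (v.drop 1)).map (fun q => q.2 - q.1) ++ [i - v.getLastD 0] := by
  induction v with
  | nil => simp at hv
  | cons a t ih =>
    cases t with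
    | nil => simp
    | cons b u =>
      have := ih (by simp)
      simp only [List.cons_append, List.drop_succ_cons, List.drop_zero] at this ⊢
      simp only [List.zip_cons_cons, List.map_cons] at this ⊢
      rw [show ((a :: b :: u).getLastD 0 = (b :: u).getLastD 0) from rfl, List.cons_append, this]

-- one loop iteration, as a statement about the positions table
-- specialized first-order versions of the view lemmas, for simp
theorem any_freqOf (P : List (Int × List Int)) (k : Int) :
    (freqOf P).any (fun q => q.1 == k) = P.any (fun q => q.1 == k) := by
  simp only [freqOf, List.any_map]; rfl
theorem any_lastOf (P : List (Int × List Int)) (k : Int) :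
    (lastOf P).any (fun q => q.1 == k) = P.any (fun q => q.1 == k) := by
  simp only [lastOf, List.any_map]; rfl
theorem any_intvOf (P : List (Int × List Int)) (k : Int) :
    (intvOf P).any (fun q => q.1 == k) = P.any (fun q => q.1 == k) := by
  simp only [intvOf, List.any_map]; rfl
theorem find?_freqOf (P : List (Int × List Int)) (k : Int) :
    List.find? (fun q => q.1 == k) (freqOf P)
      = (List.find? (fun q => q.1 == k) P).map (fun kv => (kv.1, (kv.2.length : Int))) := by
  unfold freqOf; exact find?_map_view (fun l => ((l.length : Int))) P k
theorem find?_lastOf (P : List (Int × List Int)) (k : Int) :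
    List.find? (fun q => q.1 == k) (lastOf P)
      = (List.find? (fun q => q.1 == k) P).map (fun kv => (kv.1, kv.2.getLastD 0)) := by
  unfold lastOf; exact find?_map_view (fun l => l.getLastD 0) P k
theorem find?_intvOf (P : List (Int × List Int)) (k : Int) :
    List.find? (fun q => q.1 == k) (intvOf P)
      = (List.find? (fun q => q.1 == k) P).map
          (fun kv => (kv.1, (kv.2.zip (kv.2.drop 1)).map (fun q => q.2 - q.1))) := by
  unfold intvOf; exact find?_map_view (fun l => (l.zip (l.drop 1)).map (fun q => q.2 - q.1)) P k

theorem step_view (P : List (Int × List Int)) (hP : ∀ kv ∈ P, kv.2 ≠ []) (i num : Int) :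
    aStep (PySem.Dict.mk (freqOf P), PySem.Dict.mk (lastOf P), PySem.Dict.mk (intvOf P)) (i, num)
      = (PySem.Dict.mk (freqOf (bStep (PySem.Dict.mk P) (i, num)).items),
         PySem.Dict.mk (lastOf (bStep (PySem.Dict.mk P) (i, num)).items),
         PySem.Dict.mk (intvOf (bStep (PySem.Dict.mk P) (i, num)).items)) := by
  by_cases hany : P.any (fun q => q.1 == num) = true
  · -- num is already a key of the positions table
    obtain ⟨q, hfind⟩ := Option.isSome_iff_exists.1
      (List.find?_isSome.2 (List.any_eq_true.1 hany))
    obtain ⟨k0, v⟩ := q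
    have hq1 : k0 = num := by simpa using List.find?_some hfind
    rw [hq1] at hfind
    have hvne : v ≠ [] := hP _ (List.mem_of_find?_eq_some hfind)
    simp only [aStep, bStep, PySem.Dict.modify, PySem.Dict.insert, PySem.Dict.getD,
      PySem.Dict.get?, PySem.Dict.contains]
    simp only [any_freqOf, any_lastOf, any_intvOf, hany, if_true,
      find?_freqOf, find?_lastOf, find?_intvOf, hfind,
      Option.map_some]
    simp only [Prod.mk.injEq, PySem.Dict.mk.injEq]
    refine ⟨?_, ?_, ?_⟩
    · -- frequency component
      simp only [freqOf, List.map_map]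
      refine List.map_congr_left (fun x hx => ?_)
      by_cases hb : x.1 = num <;> simp [hb, List.length_append]
    · -- last_seen component
      simp only [lastOf, List.map_map]
      refine List.map_congr_left (fun x hx => ?_)
      by_cases hb : x.1 = num <;>
        simp [hb, List.getLastD_eq_getLast?]
    · -- intervals component
      simp only [intvOf, List.map_map]
      refine List.map_congr_left (fun x hx => ?_)
      by_cases hb : x.1 = num
      · have hd := diffs_append v hvne i
        simp only [List.drop_one, List.getLastD_eq_getLast?] at hd
        simp [hb, hd]
      · simp [hb]
  · -- num is a new key: everything appends
    have hany' : P.any (fun q => q.1 == num) = false := by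
      simp only [Bool.not_eq_true] at hany; exact hany
    have hnomatch : ∀ q ∈ P, ¬ (q.1 == num) = true := List.any_eq_false.1 hany'
    have hfindP : List.find? (fun q => q.1 == num) P = none := List.find?_eq_none.2 hnomatch
    simp only [aStep, bStep, PySem.Dict.modify, PySem.Dict.insert, PySem.Dict.getD,
      PySem.Dict.get?, PySem.Dict.contains]
    simp only [any_freqOf, any_lastOf, any_intvOf, hany', if_false, Bool.false_eq_true,
      List.any_append, List.any_cons, List.any_nil, BEq.refl, Bool.or_true, Bool.true_or,
      if_true, List.find?_append, find?_freqOf, find?_lastOf, find?_intvOf,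
      hfindP, Option.map_none, Option.none_or, List.find?_cons_of_pos]
    simp only [Option.map_some, Option.getD_some, Option.getD_none, List.nil_append,
      Prod.mk.injEq, PySem.Dict.mk.injEq]
    refine ⟨?_, ?_, ?_⟩ <;>
      simp only [freqOf, lastOf, intvOf, List.map_append, List.map_map, List.map_cons,
        List.map_nil, beq_self_eq_true, if_true]
    · refine congrArg₂ (· ++ ·) (List.map_congr_left fun x hx => ?_) (by norm_num)
      have hne : ¬ x.1 = num := by simpa using hnomatch x hx
      simp [hne]
    · simp
    · simp

theorem step_nonempty (P : List (Int × List Int)) (hP : ∀ kv ∈ P, kv.2 ≠ []) (i num : Int) :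
    ∀ kv ∈ (bStep (PySem.Dict.mk P) (i, num)).items, kv.2 ≠ [] := by
  intro kv hkv
  simp only [bStep, PySem.Dict.insert] at hkv
  split at hkv
  · obtain ⟨q, hq, rfl⟩ := List.mem_map.1 hkv
    by_cases hb : q.1 == num <;> simp [hb, hP q hq]
  · rcases List.mem_append.1 hkv with h | h
    · exact hP kv h
    · simp at h
      subst h
      simp

theorem loop_view (l : List (Int × Int)) (P : List (Int × List Int)) (hP : ∀ kv ∈ P, kv.2 ≠ []) :
    l.foldl aStep (PySem.Dict.mk (freqOf P), PySem.Dict.mk (lastOf P), PySem.Dict.mk (intvOf P))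
      = (PySem.Dict.mk (freqOf (l.foldl bStep (PySem.Dict.mk P)).items),
         PySem.Dict.mk (lastOf (l.foldl bStep (PySem.Dict.mk P)).items),
         PySem.Dict.mk (intvOf (l.foldl bStep (PySem.Dict.mk P)).items)) := by
  induction l generalizing P with
  | nil => rfl
  | cons p t ih =>
    obtain ⟨i, num⟩ := p
    rw [List.foldl_cons, List.foldl_cons, step_view P hP i num]
    exact ih (bStep (PySem.Dict.mk P) (i, num)).items (step_nonempty P hP i num)

-- ===== VERDICT (by name: the statement is the Claim_ definition above) =====
theorem analyze_sequence_spec : Claim_equal_analyze_sequence := by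
  intro seq _
  unfold Spec_analyze_sequence analyze_sequence analyze_sequence_alt
  have h := loop_view (PySem.List.enumerate seq 0) [] (by simp)
  simp only [freqOf, lastOf, intvOf, List.map_nil] at h
  rw [show (PySem.Dict.empty : PySem.Dict Int Int) = PySem.Dict.mk [] from rfl,
      show (PySem.Dict.empty : PySem.Dict Int (List Int)) = PySem.Dict.mk [] from rfl] at *
  rw [h]
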